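-- pv_equiv track=rewrite | github.com/HcxTNuiJVqU7shPzL0ss/nbi2024_recap | l02_prog_m_py/week04_assignment/w04_ex_04/src_tapht25d/ex04_functions.py | check_same_rank
-- ===== SOURCE A (Python) =====
-- import operator
--
-- def check_same_rank(card_list):
--     """Use to check if cards have the same rank.
--
--     Returns a list containing how many times all possible
--     ranks appear in a hand.
--     """
--     # Ensure a list has been used as parameter argument
--     if not isinstance(card_list, list):
--         return None
--     # Create a separate list containing only the card ranks
--     rank_list = []
--     # Count each possible rank for how many there are
--     counted_ranks = []
--     for suit, rank in card_list:
--         rank_list.append(rank)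
--     for possible_rank in range(2, 15):
--         counted_ranks.append(operator.countOf
--                              (rank_list, possible_rank))
--     return counted_ranks
-- ===== SOURCE B (Python) =====
-- def check_same_rank(card_list):
--     """Use to check if cards have the same rank.
--
--     Returns a list containing how many times all possible
--     ranks appear in a hand.
--     """
--     if not isinstance(card_list, list):
--         return None
--     # Sort the ranks once, then sweep the sorted list with a single
--     # pointer, emitting the length of each run of equal ranks.
--     ranks = sorted(rank for suit, rank in card_list)
--     i = 0
--     while i < len(ranks) and ranks[i] < 2:
--         i += 1
--     counted_ranks = []
--     for possible_rank in range(2, 15):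
--         run = 0
--         while i < len(ranks) and ranks[i] == possible_rank:
--             run += 1
--             i += 1
--         counted_ranks.append(run)
--     return counted_ranks
-- ===== Notes on version B (the rewrite author's own statement) =====
-- stated objective: alternative
-- what changed: Replaces the 13 separate operator.countOf scans with a sort of the ranks followed by a single merge-style pointer sweep that reads off each rank's run length.
import Mathlib
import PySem

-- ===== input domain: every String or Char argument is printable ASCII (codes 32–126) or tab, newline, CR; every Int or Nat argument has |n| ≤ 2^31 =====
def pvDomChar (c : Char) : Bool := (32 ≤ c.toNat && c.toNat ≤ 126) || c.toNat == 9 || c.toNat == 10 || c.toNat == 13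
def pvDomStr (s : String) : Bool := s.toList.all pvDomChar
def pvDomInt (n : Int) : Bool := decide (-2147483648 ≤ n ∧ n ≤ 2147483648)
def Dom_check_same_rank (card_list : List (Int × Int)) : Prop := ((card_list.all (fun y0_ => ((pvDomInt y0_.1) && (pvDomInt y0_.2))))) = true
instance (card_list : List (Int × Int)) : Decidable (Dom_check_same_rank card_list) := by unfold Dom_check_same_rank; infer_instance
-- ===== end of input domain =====

-- B replaces A's 13 separate countOf scans with a sort of the ranks followed by one
-- merge-style pointer sweep that reads off each rank's run length (objective: alternative).

-- ===== PORT A =====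
def check_same_rank (card_list : List (Int × Int)) : List Int :=
  let rank_list := card_list.foldl (fun acc p => acc ++ [p.2]) []
  (PySem.List.pyRange 2 15 1).foldl
    (fun acc possible_rank => acc ++ [(PySem.List.count rank_list possible_rank : Int)]) []

-- ===== PORT B =====
-- 'while i < len(ranks) and ranks[i] < 2: i += 1' — the pointer into the sorted list is
-- represented by the remaining suffix.
def pvSkipBelow2 : List Int → List Int
  | [] => []
  | x :: xs => if x < 2 then pvSkipBelow2 xs else x :: xs

-- the inner 'while … ranks[i] == possible_rank: run += 1; i += 1' loop: run length and rest
def pvRun (r : Int) : List Int → Int × List Int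
  | [] => (0, [])
  | x :: xs => if x = r then
      let p := pvRun r xs
      (p.1 + 1, p.2)
    else (0, x :: xs)

def check_same_rank_alt (card_list : List (Int × Int)) : List Int :=
  let ranks := PySem.List.sorted (card_list.map (fun p => p.2)) (fun x => x) false
  let rest0 := pvSkipBelow2 ranks
  ((PySem.List.pyRange 2 15 1).foldl
    (fun st possible_rank =>
      let p := pvRun possible_rank st.2
      (st.1 ++ [p.1], p.2))
    (([] : List Int), rest0)).1

-- ===== PRECONDITION & SPEC =====
def Spec_check_same_rank (card_list : List (Int × Int)) (out : List Int) : Prop := out = check_same_rank_alt card_list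
instance (card_list : List (Int × Int)) (out : List Int) : Decidable (Spec_check_same_rank card_list out) := by unfold Spec_check_same_rank; infer_instance

-- ===== CLAIM (what is proved, stated in full; the proofs are below) =====
def Claim_equal_check_same_rank : Prop := ∀ (card_list : List (Int × Int)), Dom_check_same_rank card_list → Spec_check_same_rank card_list (check_same_rank card_list)

-- ===== LEMMAS AND PROOFS =====

theorem foldl_append_singleton {α β : Type} (f : α → β) (l : List α) (acc : List β) :
    l.foldl (fun a x => a ++ [f x]) acc = acc ++ l.map f := by
  induction l generalizing acc with
  | nil => simp
  | cons x xs ih => simp [List.foldl, ih]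

-- On a sorted list whose elements are all ≥ r, pvRun returns the multiplicity of r
-- and a rest that is sorted, all > r, with all other multiplicities unchanged.
theorem pvRun_spec (r : Int) (l : List Int) (hs : l.Pairwise (· ≤ ·))
    (hge : ∀ x ∈ l, r ≤ x) :
    (pvRun r l).1 = (l.count r : Int) ∧
    (pvRun r l).2.Pairwise (· ≤ ·) ∧
    (∀ x ∈ (pvRun r l).2, r + 1 ≤ x) ∧
    (∀ v, v ≠ r → (pvRun r l).2.count v = l.count v) := by
  induction l with
  | nil => simp [pvRun]
  | cons x xs ih =>
    rcases List.pairwise_cons.mp hs with ⟨hx, hxs⟩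
    by_cases hxr : x = r
    · have hstep : pvRun r (x :: xs) = ((pvRun r xs).1 + 1, (pvRun r xs).2) := by
        simp [pvRun, hxr]
      have h := ih hxs (fun y hy => hge y (List.mem_cons_of_mem _ hy))
      rw [hstep]
      refine ⟨?_, h.2.1, h.2.2.1, ?_⟩
      · show (pvRun r xs).1 + 1 = _
        rw [h.1, hxr, List.count_cons_self]
        push_cast; ring
      · intro v hv
        show ((pvRun r xs).2).count v = _
        rw [h.2.2.2 v hv, hxr]
        simp [List.count_cons]
        exact fun h => hv h.symm
    · have hstep : pvRun r (x :: xs) = (0, x :: xs) := by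
        simp [pvRun, hxr]
      have hxgt : r < x := lt_of_le_of_ne (hge x (List.mem_cons_self)) (Ne.symm hxr)
      rw [hstep]
      refine ⟨?_, hs, ?_, fun v _ => rfl⟩
      · have : (x :: xs).count r = 0 := by
          rw [List.count_eq_zero]
          intro hmem
          rcases List.mem_cons.mp hmem with h | h
          · exact hxr h.symm
          · exact absurd (hx r h) (not_le.mpr hxgt)
        rw [this]; rfl
      · intro y hy
        rcases List.mem_cons.mp hy with h | h
        · omega
        · have := hx y h; omega

-- pvSkipBelow2 keeps the list sorted, leaves only elements ≥ 2, and preserves the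
-- multiplicity of every value ≥ 2.
theorem pvSkipBelow2_spec (l : List Int) (hs : l.Pairwise (· ≤ ·)) :
    (pvSkipBelow2 l).Pairwise (· ≤ ·) ∧
    (∀ x ∈ pvSkipBelow2 l, 2 ≤ x) ∧
    (∀ v : Int, 2 ≤ v → (pvSkipBelow2 l).count v = l.count v) := by
  induction l with
  | nil => simp [pvSkipBelow2]
  | cons x xs ih =>
    rcases List.pairwise_cons.mp hs with ⟨hx, hxs⟩
    by_cases h2 : x < 2
    · have hstep : pvSkipBelow2 (x :: xs) = pvSkipBelow2 xs := by
        simp [pvSkipBelow2, h2]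
      have h := ih hxs
      rw [hstep]
      refine ⟨h.1, h.2.1, fun v hv => ?_⟩
      rw [h.2.2 v hv, List.count_cons_of_ne (by omega)]
    · have hstep : pvSkipBelow2 (x :: xs) = x :: xs := by
        simp [pvSkipBelow2, h2]
      rw [hstep]
      refine ⟨hs, ?_, fun v _ => rfl⟩
      intro y hy
      rcases List.mem_cons.mp hy with h | h
      · omega
      · have := hx y h; omega

-- The sweep over range(a, a+k) starting from a sorted rest with all elements ≥ a
-- appends exactly the multiplicities of a, a+1, …, a+k-1 in rest.
theorem pvLoop_spec (k : Nat) (a : Int) (l : List Int) (acc : List Int)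
    (hs : l.Pairwise (· ≤ ·)) (hge : ∀ x ∈ l, a ≤ x) :
    ((PySem.List.pyRange a (a + k) 1).foldl
      (fun st possible_rank =>
        let p := pvRun possible_rank st.2
        (st.1 ++ [p.1], p.2))
      (acc, l)).1
      = acc ++ (List.range k).map (fun j : Nat => (l.count (a + (j : Int)) : Int)) := by
  induction k generalizing a l acc with
  | zero =>
    have h0 : a + ((0 : Nat) : Int) = a := by norm_num
    have hnil : PySem.List.pyRange a a 1 = [] := by
      rw [PySem.List.pyRange_one]; simp
    rw [h0, hnil]
    simp
  | succ k ih =>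
    have hab : a < a + ((k + 1 : Nat) : Int) := by push_cast; omega
    rw [PySem.List.pyRange_one_cons hab]
    simp only [List.foldl_cons]
    obtain ⟨h1, h2, h3, h4⟩ := pvRun_spec a l hs hge
    have hrange : (a + ((k + 1 : Nat) : Int)) = (a + 1) + (k : Nat) := by push_cast; ring
    rw [hrange, ih (a + 1) (pvRun a l).2 (acc ++ [(pvRun a l).1]) h2 h3]
    rw [List.range_succ_eq_map, List.map_cons, List.map_map, List.append_assoc,
        List.singleton_append]
    congr 1
    congr 1
    · rw [h1]; norm_num
    · apply List.map_congr_left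
      intro j _
      have hne : (a + 1 + (j : Int)) ≠ a := by omega
      show (((pvRun a l).2.count (a + 1 + (j : Int)) : Int)) = _
      rw [h4 _ hne]
      congr 2
      push_cast; ring

-- ===== VERDICT (by name: the statement is the Claim_ definition above) =====
theorem check_same_rank_spec : Claim_equal_check_same_rank := by
  intro card_list _
  unfold Spec_check_same_rank check_same_rank check_same_rank_alt
  rw [foldl_append_singleton]
  set ranks := PySem.List.sorted (card_list.map (fun p => p.2)) (fun x => x) false with hr
  have hperm : ranks.Perm (card_list.map (fun p => p.2)) := PySem.List.sorted_perm _ _ _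
  have hsorted : ranks.Pairwise (· ≤ ·) := PySem.List.sorted_pairwise _ _
  obtain ⟨hs0, hge0, hcnt0⟩ := pvSkipBelow2_spec ranks hsorted
  have h15 : (15 : Int) = 2 + ((13 : Nat) : Int) := by norm_num
  rw [h15, pvLoop_spec 13 2 (pvSkipBelow2 ranks) [] hs0 hge0]
  have hpr : PySem.List.pyRange 2 (2 + ((13 : Nat) : Int)) 1
      = (List.range 13).map (fun k : Nat => (2 : Int) + k) := by
    rw [PySem.List.pyRange_one]
    norm_num
    rfl
  rw [hpr]
  simp only [List.map_map, List.nil_append]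
  apply List.map_congr_left
  intro j _
  show ((PySem.List.count (card_list.foldl (fun acc p => acc ++ [p.2]) []) (2 + (j : Int)) : Int)) = _
  rw [show (card_list.foldl (fun acc p => acc ++ [p.2]) []) =
        card_list.map (fun p : Int × Int => p.2) from foldl_append_singleton _ _ _]
  unfold PySem.List.count
  rw [← hperm.count_eq, ← hcnt0 (2 + (j : Int)) (by omega)]
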